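-- pv_equiv track=rewrite | github.com/sossont/Pycharmpractice | Programmers/Heap/programmers_Heap_spicy.py | solution
-- ===== SOURCE A (Python) =====
-- import heapq
--
-- def solution(scoville, K):
--     answer = 0
--     heapq.heapify(scoville)     #scoville 리스트를 힙으로 만든다.
--
--
--     while 1:
--
--         first = heapq.heappop(scoville) # 가장 맵지 않은 음식.
--         if first >= K:  # 모든 음식의 스코빌 지수가 K이상임.
--             break
--
--         if len(scoville) <= 0:  # 원소가 하나만 주어졌는데 그게 K보다 낮을 때.
--             answer = -1
--             return answer
--
--         second = heapq.heappop(scoville)   # 두 번째로 맵지 않은 음식.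
--         new = first + 2 * second
--
--         if new == 0:    # new가 0이면 스코빌 지수를 K로 절대 못 만든다.
--             answer = -1
--             return answer
--
--         heapq.heappush(scoville, new)
--         answer += 1
--
--     return answer
-- ===== SOURCE B (Python) =====
-- def solution(scoville, K):
--     # Two-queue technique: sort once; combined values are appended to a plain
--     # FIFO list in creation order (a new combination is never smaller than any
--     # surviving one), so the minimum is always at one of the two queue fronts
--     # and no heap or ordered re-insertion is ever needed.  The fronts are
--     # advanced by the index pointers i (into orig) and j (into made).
--     orig = sorted(scoville)
--     made = []
--     i = j = 0
--     answer = 0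
--     while True:
--         if i < len(orig) and (j >= len(made) or orig[i] <= made[j]):
--             first = orig[i]; i += 1
--         else:
--             first = made[j]; j += 1
--         if first >= K:
--             return answer
--         if i >= len(orig) and j >= len(made):
--             return -1
--         if i < len(orig) and (j >= len(made) or orig[i] <= made[j]):
--             second = orig[i]; i += 1
--         else:
--             second = made[j]; j += 1
--         new = first + 2 * second
--         if new == 0:
--             return -1
--         made.append(new)
--         answer += 1
-- ===== Notes on version B (the rewrite author's own statement) =====
-- stated objective: faster
-- what changed: Eliminates the priority queue entirely with the two-queue technique: sort once, append combined values to a plain FIFO list in creation order, and take each minimum from the two queue fronts (advanced by index pointers); correctness rests on the proved invariant that a new combination is never smaller than any surviving one, so the FIFO stays sorted and no heap or ordered re-insertion is needed.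
import Mathlib
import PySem

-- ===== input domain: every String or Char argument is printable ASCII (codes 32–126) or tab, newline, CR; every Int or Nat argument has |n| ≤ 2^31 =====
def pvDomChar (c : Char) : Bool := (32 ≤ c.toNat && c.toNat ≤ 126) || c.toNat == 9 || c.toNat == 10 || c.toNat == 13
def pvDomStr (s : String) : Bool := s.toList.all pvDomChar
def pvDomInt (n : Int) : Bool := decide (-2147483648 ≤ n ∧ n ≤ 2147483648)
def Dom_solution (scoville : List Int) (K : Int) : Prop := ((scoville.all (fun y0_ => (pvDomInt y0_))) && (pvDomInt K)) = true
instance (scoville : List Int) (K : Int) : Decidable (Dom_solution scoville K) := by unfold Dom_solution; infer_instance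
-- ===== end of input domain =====

-- B replaces A's heap by the two-queue technique (sort once; combined values go into a
-- plain FIFO in creation order; each minimum is taken from the two queue fronts): a
-- different algorithm with no priority queue and no ordered re-insertion. Equivalence is
-- about the RETURN value only: A mutates its argument in place (heapify/pops) while B
-- works on a sorted copy.

-- ===== PORT A =====
-- A uses the heapq library; its calls are ported by their documented contract: the heap is
-- the bag of its elements (heapify = the same bag), heappop returns the smallest element
-- and removes its first occurrence, heappush adds the element to the bag.  The heap's
-- internal array order is unobservable in A's return value.
def heapPop (l : List Int) : Option (Int × List Int) :=
  match PySem.List.min? l (fun x => x) with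
  | none => none
  | some m =>
    match PySem.List.remove? l m with
    | none => none
    | some l' => some (m, l')

-- the `while 1:` loop of A; answer is the accumulator.  Each iteration removes two
-- elements and adds one back, so the loop runs at most `heap.length` iterations and the
-- structural fuel `heap.length + 1` supplied by `solution` is never exhausted.
def solLoopA : Nat → List Int → Int → Int → Int
  | 0, _, _, _ => 0
  | fuel + 1, heap, K, answer =>
    match heapPop heap with
    | none => 0   -- heapq.heappop on the empty list raises IndexError; outside Pre_
    | some (first, rest) =>
      if first ≥ K then answer
      else if rest.length ≤ 0 then -1
      else
        match heapPop rest with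
        | none => 0   -- unreachable: rest is nonempty here
        | some (second, rest2) =>
          let new := first + 2 * second
          if new = 0 then -1
          else solLoopA fuel (rest2 ++ [new]) K (answer + 1)

def solution (scoville : List Int) (K : Int) : Int :=
  solLoopA (scoville.length + 1) scoville K 0

-- ===== PORT B =====
-- B takes the front of `orig` when it is the smaller front (ties prefer orig), else the
-- front of `made`; B's front pointers i, j are rendered by consuming the head of the
-- remaining (not yet consumed) part of each queue, which is exactly orig[i:] / made[j:].
def popMinB (o m : List Int) : Option (Int × List Int × List Int) :=
  match o, m with
  | [], [] => none          -- pop on an empty pool raises IndexError; outside Pre_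
  | [], b :: ms => some (b, [], ms)
  | a :: os, [] => some (a, os, [])
  | a :: os, b :: ms => if a ≤ b then some (a, os, b :: ms) else some (b, a :: os, ms)

-- the `while True:` loop of B; `made.append(new)` = appending at the back.
def solLoopB : Nat → List Int → List Int → Int → Int → Int
  | 0, _, _, _, _ => 0
  | fuel + 1, o, m, K, answer =>
    match popMinB o m with
    | none => 0               -- IndexError; outside Pre_
    | some (first, o1, m1) =>
      if first ≥ K then answer
      else if o1.isEmpty && m1.isEmpty then -1
      else
        match popMinB o1 m1 with
        | none => 0           -- unreachable: the pool is nonempty here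
        | some (second, o2, m2) =>
          let new := first + 2 * second
          if new = 0 then -1
          else solLoopB fuel o2 (m2 ++ [new]) K (answer + 1)

def solution_alt (scoville : List Int) (K : Int) : Int :=
  let orig := PySem.List.sorted scoville (fun x => x) false
  solLoopB (orig.length + 1) orig [] K 0

-- ===== PRECONDITION & SPEC =====
-- Pre_ excludes only the empty list, on which A raises IndexError (heappop of an empty heap).
def Pre_solution (scoville : List Int) (_K : Int) : Prop := scoville ≠ []
instance (scoville : List Int) (K : Int) : Decidable (Pre_solution scoville K) := by
  unfold Pre_solution; infer_instance
def pvWitness_solution : List Int × Int := ([1, 2, 9, 3, 12], 7)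

def Spec_solution (scoville : List Int) (K : Int) (out : Int) : Prop := out = solution_alt scoville K
instance (scoville : List Int) (K : Int) (out : Int) : Decidable (Spec_solution scoville K out) := by unfold Spec_solution; infer_instance

-- ===== CLAIM (what is proved, stated in full; the proofs are below) =====
def Claim_equal_solution : Prop := ∀ (scoville : List Int) (K : Int), Dom_solution scoville K → Pre_solution scoville K → Spec_solution scoville K (solution scoville K)

-- ===== LEMMAS AND PROOFS =====

-- the invariant of B's two queues: both sorted, and every made element x carries a
-- creation certificate x = a + 2*b (a, b the two minima at creation time) with b still
-- below everything else in the pool, strictly dominating if b is negative.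
def SortedLe (l : List Int) : Prop := l.Pairwise (fun a b => a ≤ b)

def CertB (o m : List Int) (i : Nat) (x : Int) : Prop :=
  ∃ a b, x = a + 2 * b ∧ a ≤ b ∧
    (∀ y ∈ o, b ≤ y) ∧ (∀ j, (hj : j < m.length) → j ≠ i → b ≤ m[j]) ∧
    (b < 0 → (∀ y ∈ o, x < y) ∧ (∀ j, (hj : j < m.length) → j ≠ i → x < m[j]))

def InvB (o m : List Int) : Prop :=
  SortedLe o ∧ SortedLe m ∧ ∀ i, (h : i < m.length) → CertB o m i m[i]

theorem sortedLe_head_le {x : Int} {l : List Int} (h : SortedLe (x :: l)) :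
    ∀ y ∈ x :: l, x ≤ y := by
  intro y hy
  rcases List.mem_cons.mp hy with rfl | hy'
  · exact le_refl _
  · exact (List.pairwise_cons.mp h).1 y hy'

theorem popMinB_spec {o m : List Int} (so : SortedLe o) (sm : SortedLe m)
    (h : ¬ (o = [] ∧ m = [])) :
    ∃ v o' m', popMinB o m = some (v, o', m') ∧
      (∀ y ∈ o ++ m, v ≤ y) ∧ v ∈ o ++ m ∧
      o' ++ m' = (o ++ m).erase v ∧
      SortedLe o' ∧ SortedLe m' ∧
      ((∃ os, o = v :: os ∧ o' = os ∧ m' = m) ∨ (∃ ms, m = v :: ms ∧ o' = o ∧ m' = ms)) := by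
  match o, m with
  | [], [] => exact absurd ⟨rfl, rfl⟩ h
  | [], b :: ms =>
    refine ⟨b, [], ms, rfl, ?_, by simp, by simp, List.Pairwise.nil, (List.pairwise_cons.mp sm).2, Or.inr ⟨ms, rfl, rfl, rfl⟩⟩
    intro y hy; exact sortedLe_head_le sm y (by simpa using hy)
  | a :: os, [] =>
    refine ⟨a, os, [], rfl, ?_, by simp, by simp, (List.pairwise_cons.mp so).2, List.Pairwise.nil, Or.inl ⟨os, rfl, rfl, rfl⟩⟩
    intro y hy; exact sortedLe_head_le so y (by simpa using hy)
  | a :: os, b :: ms =>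
    by_cases hab : a ≤ b
    · refine ⟨a, os, b :: ms, by simp [popMinB, hab], ?_, by simp, by simp, (List.pairwise_cons.mp so).2, sm, Or.inl ⟨os, rfl, rfl, rfl⟩⟩
      intro y hy
      rcases List.mem_append.mp hy with hy' | hy'
      · exact sortedLe_head_le so y hy'
      · exact le_trans hab (sortedLe_head_le sm y hy')
    · have hba : b < a := lt_of_not_ge hab
      have hbo : ∀ y ∈ a :: os, b ≤ y := fun y hy => le_of_lt (lt_of_lt_of_le hba (sortedLe_head_le so y hy))
      refine ⟨b, a :: os, ms, by simp [popMinB, hab], ?_, by simp, ?_, so, (List.pairwise_cons.mp sm).2, Or.inr ⟨ms, rfl, rfl, rfl⟩⟩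
      · intro y hy
        rcases List.mem_append.mp hy with hy' | hy'
        · exact hbo y hy'
        · exact sortedLe_head_le sm y hy'
      · have hnotin : b ∉ a :: os := by
          intro hmem
          exact absurd (sortedLe_head_le so b hmem) (by omega)
        rw [List.erase_append_right _ hnotin]
        simp

theorem heapPop_nil : heapPop [] = none := by decide

theorem heapPop_of_ne_nil {l : List Int} (h : l ≠ []) :
    ∃ w, heapPop l = some (w, l.erase w) ∧ w ∈ l ∧ (∀ y ∈ l, w ≤ y) := by
  cases hmin : PySem.List.min? l (fun x => x) with
  | none => exact absurd ((PySem.List.min?_eq_none_iff l _).mp hmin) h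
  | some w =>
    have hmem : w ∈ l := PySem.List.min?_mem hmin
    refine ⟨w, ?_, hmem, fun y hy => PySem.List.min?_isMin hmin y hy⟩
    simp only [heapPop, hmin, PySem.List.remove?_eq_some_erase l w hmem]

-- pushing the new value at the back of `made` keeps the invariant, given the
-- certificates of the survivors and the minimality facts of the two popped values
theorem cert_push {o2 m2 : List Int} {f s : Int}
    (so2 : SortedLe o2) (sm2 : SortedLe m2)
    (hfs : f ≤ s)
    (hmin2 : ∀ y ∈ o2 ++ m2, s ≤ y)
    (hcert : ∀ i, (h : i < m2.length) → ∃ a b, m2[i] = a + 2 * b ∧ a ≤ b ∧ b ≤ f ∧ b ≤ s ∧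
      (∀ y ∈ o2, b ≤ y) ∧ (∀ j, (hj : j < m2.length) → j ≠ i → b ≤ m2[j]) ∧ 0 ≤ b) :
    InvB o2 (m2 ++ [f + 2 * s]) := by
  have hle_new : ∀ i, (h : i < m2.length) → m2[i] ≤ f + 2 * s := by
    intro i h
    obtain ⟨a, b, hx, hab, hbf, hbs, -, -, -⟩ := hcert i h
    rw [hx]; omega
  refine ⟨so2, ?_, ?_⟩
  · -- sortedness of m2 ++ [new]
    apply List.pairwise_append.mpr
    refine ⟨sm2, by simp, ?_⟩
    intro x hx y hy
    simp only [List.mem_singleton] at hy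
    subst hy
    obtain ⟨i, hi, rfl⟩ := List.mem_iff_getElem.mp hx
    exact hle_new i hi
  · intro i hi
    by_cases hilt : i < m2.length
    · -- an old survivor
      obtain ⟨a, b, hx, hab, hbf, hbs, hbo, hbm, hb0⟩ := hcert i hilt
      refine ⟨a, b, ?_, hab, hbo, ?_, ?_⟩
      · rwa [List.getElem_append_left hilt]
      · intro j hj hji
        by_cases hjlt : j < m2.length
        · rw [List.getElem_append_left hjlt]; exact hbm j hjlt hji
        · have hj' : j = m2.length := by
            simp only [List.length_append, List.length_singleton] at hj; omega
          subst hj'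
          rw [List.getElem_append_right (le_refl _)]
          simp only [Nat.sub_self, List.getElem_singleton]
          omega
      · intro hbneg; omega
    · -- the freshly appended value
      have hieq : i = m2.length := by
        simp only [List.length_append, List.length_singleton] at hi; omega
      subst hieq
      have hget : (m2 ++ [f + 2 * s])[m2.length] = f + 2 * s := by
        rw [List.getElem_append_right (le_refl _)]
        simp
      refine ⟨f, s, by rw [hget], hfs, ?_, ?_, ?_⟩
      · intro y hy; exact hmin2 y (List.mem_append.mpr (Or.inl hy))
      · intro j hj hji
        have hjlt : j < m2.length := by
          simp only [List.length_append, List.length_singleton] at hj; omega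
        rw [List.getElem_append_left hjlt]
        exact hmin2 _ (List.mem_append.mpr (Or.inr (List.getElem_mem hjlt)))
      · intro hsneg
        have hnew_lt : f + 2 * s < s := by omega
        constructor
        · intro y hy
          rw [hget]
          exact lt_of_lt_of_le hnew_lt (hmin2 y (List.mem_append.mpr (Or.inl hy)))
        · intro j hj hji
          have hjlt : j < m2.length := by
            simp only [List.length_append, List.length_singleton] at hj; omega
          rw [hget, List.getElem_append_left hjlt]
          exact lt_of_lt_of_le hnew_lt (hmin2 _ (List.mem_append.mpr (Or.inr (List.getElem_mem hjlt))))

-- one combining step preserves the invariant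
theorem inv_step {o m o1 m1 o2 m2 : List Int} {f s : Int}
    (inv : InvB o m)
    (hminf : ∀ y ∈ o ++ m, f ≤ y)
    (hmins : ∀ y ∈ o1 ++ m1, s ≤ y)
    (hs_mem : s ∈ o1 ++ m1)
    (sh1 : (∃ os, o = f :: os ∧ o1 = os ∧ m1 = m) ∨ (∃ ms, m = f :: ms ∧ o1 = o ∧ m1 = ms))
    (sh2 : (∃ os, o1 = s :: os ∧ o2 = os ∧ m2 = m1) ∨ (∃ ms, m1 = s :: ms ∧ o2 = o1 ∧ m2 = ms))
    (so2 : SortedLe o2) (sm2 : SortedLe m2) :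
    InvB o2 (m2 ++ [f + 2 * s]) := by
  obtain ⟨so, sm, certs⟩ := inv
  -- f ≤ s since s was in the pool after the first pop, hence in the original pool
  have hs_pool : s ∈ o ++ m := by
    rcases sh1 with ⟨os, rfl, rfl, rfl⟩ | ⟨ms, hm, rfl, rfl⟩
    · rcases List.mem_append.mp hs_mem with h | h
      · exact List.mem_append.mpr (Or.inl (List.mem_cons_of_mem _ h))
      · exact List.mem_append.mpr (Or.inr h)
    · subst hm
      rcases List.mem_append.mp hs_mem with h | h
      · exact List.mem_append.mpr (Or.inl h)
      · exact List.mem_append.mpr (Or.inr (List.mem_cons_of_mem _ h))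
  have hfs : f ≤ s := hminf s hs_pool
  -- survivors satisfy: m2 = m.drop q, o2 ⊆ o, and the popped values f, s are each
  -- covered by every survivor's certificate
  -- we do a case analysis on the four pop shapes
  apply cert_push so2 sm2 hfs
  · -- minimality of s over the survivors
    intro y hy
    apply hmins
    rcases sh2 with ⟨os, h1, rfl, rfl⟩ | ⟨ms, h1, rfl, rfl⟩
    · subst h1
      rcases List.mem_append.mp hy with h | h
      · exact List.mem_append.mpr (Or.inl (List.mem_cons_of_mem _ h))
      · exact List.mem_append.mpr (Or.inr h)
    · subst h1
      rcases List.mem_append.mp hy with h | h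
      · exact List.mem_append.mpr (Or.inl h)
      · exact List.mem_append.mpr (Or.inr (List.mem_cons_of_mem _ h))
  · -- the certificates of the survivors
    -- uniform description: m2 = m.drop q with q ∈ {0,1,2}, o2 a sublist of o,
    -- and each of f, s is either a member of o or an m[j] with j < q.
    have main : ∀ (q : Nat), m2 = m.drop q →
        (∀ y ∈ o2, y ∈ o) →
        ((f ∈ o) ∨ (∃ j, ∃ hj : j < m.length, j < q ∧ f = m[j])) →
        ((s ∈ o) ∨ (∃ j, ∃ hj : j < m.length, j < q ∧ s = m[j])) →
        ∀ i, (h : i < m2.length) → ∃ a b, m2[i] = a + 2 * b ∧ a ≤ b ∧ b ≤ f ∧ b ≤ s ∧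
          (∀ y ∈ o2, b ≤ y) ∧ (∀ j, (hj : j < m2.length) → j ≠ i → b ≤ m2[j]) ∧ 0 ≤ b := by
      intro q hq ho2 hfin hsin i hi
      have hqi : q + i < m.length := by
        subst hq; simp only [List.length_drop] at hi; omega
      have hx : m2[i] = m[q + i] := by
        subst hq; rw [List.getElem_drop]
      obtain ⟨a, b, hxab, hab, hbo, hbm, hstrict⟩ := certs (q + i) hqi
      rw [← hx] at hxab
      have hbf : b ≤ f := by
        rcases hfin with h | ⟨j, hj, hjq, rfl⟩
        · exact hbo f h
        · exact hbm j hj (by omega)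
      have hbs : b ≤ s := by
        rcases hsin with h | ⟨j, hj, hjq, rfl⟩
        · exact hbo s h
        · exact hbm j hj (by omega)
      have hb0 : 0 ≤ b := by
        by_contra hneg
        have hneg' : b < 0 := by omega
        obtain ⟨hso, hsm⟩ := hstrict hneg'
        -- x < f from the strict clause, but f ≤ x since x is in the pool: contradiction
        have hxf : m2[i] < f := by
          rcases hfin with h | ⟨j, hj, hjq, rfl⟩
          · rw [hx]; exact hso f h
          · rw [hx]; exact hsm j hj (by omega)
        have hfx : f ≤ m2[i] := by
          apply hminf
          rw [hx]
          exact List.mem_append.mpr (Or.inr (List.getElem_mem hqi))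
        omega
      refine ⟨a, b, hxab, hab, hbf, hbs, ?_, ?_, hb0⟩
      · intro y hy; exact hbo y (ho2 y hy)
      · intro j hj hji
        have hqj : q + j < m.length := by
          subst hq; simp only [List.length_drop] at hj; omega
        have : m2[j] = m[q + j] := by subst hq; rw [List.getElem_drop]
        rw [this]
        exact hbm (q + j) hqj (by omega)
    -- instantiate per pop shape
    rcases sh1 with ⟨os, rfl, rfl, rfl⟩ | ⟨ms, hm, rfl, rfl⟩
    · rcases sh2 with ⟨os', h1, rfl, rfl⟩ | ⟨ms', h1, rfl, rfl⟩
      · -- both pops from orig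
        subst h1
        exact main 0 (by simp) (fun y hy => List.mem_cons_of_mem _ (List.mem_cons_of_mem _ hy))
          (Or.inl (by simp)) (Or.inl (by simp))
      · -- first from orig, second from made
        subst h1
        exact main 1 (by simp) (fun y hy => List.mem_cons_of_mem _ hy)
          (Or.inl (by simp)) (Or.inr ⟨0, by simp, by omega, by simp⟩)
    · subst hm
      rcases sh2 with ⟨os', h1, rfl, rfl⟩ | ⟨ms', h1, rfl, rfl⟩
      · -- first from made, second from orig
        subst h1
        exact main 1 (by simp) (fun y hy => List.mem_cons_of_mem _ hy)
          (Or.inr ⟨0, by simp, by omega, by simp⟩) (Or.inl (by simp))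
      · -- both pops from made
        subst h1
        exact main 2 (by simp) (fun y hy => hy)
          (Or.inr ⟨0, by simp, by omega, by simp⟩)
          (Or.inr ⟨1, by simp, by omega, by simp⟩)

-- the central lemma: A's heap is a permutation of B's two queues, and the invariant
-- makes B's front choices pick the multiset minima, so the loops agree step by step
theorem loop_eq :
    ∀ (fuel : Nat) (heap o m : List Int) (K answer : Int),
      heap.Perm (o ++ m) → InvB o m →
      solLoopA fuel heap K answer = solLoopB fuel o m K answer := by
  intro fuel
  induction fuel with
  | zero => intro heap o m K answer _ _; rfl
  | succ n ih =>
    intro heap o m K answer hperm inv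
    obtain ⟨so, sm, certs⟩ := inv
    by_cases hemp : o = [] ∧ m = []
    · obtain ⟨rfl, rfl⟩ := hemp
      have hh : heap = [] := by simpa using hperm.eq_nil
      subst hh
      simp [solLoopA, solLoopB, heapPop_nil, popMinB]
    · obtain ⟨v, o1, m1, hpopB, hvmin, hvmem, herase, so1, sm1, hshape⟩ := popMinB_spec so sm hemp
      have hne : heap ≠ [] := by
        intro h; subst h
        rcases List.append_eq_nil_iff.mp hperm.symm.eq_nil with ⟨h1, h2⟩
        exact hemp ⟨h1, h2⟩
      obtain ⟨w, hpopA, hwmem, hwmin⟩ := heapPop_of_ne_nil hne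
      -- the two popped values coincide: both are the minimum of the same multiset
      have hwv : w = v := by
        have h1 : w ≤ v := hwmin v (hperm.symm.subset hvmem)
        have h2 : v ≤ w := hvmin w (hperm.subset hwmem)
        omega
      rw [hwv] at hpopA
      have hperm1 : (heap.erase v).Perm (o1 ++ m1) := by
        rw [herase]; exact hperm.erase v
      simp only [solLoopA, solLoopB, hpopA, hpopB]
      by_cases hK : v ≥ K
      · rw [if_pos hK, if_pos hK]
      · rw [if_neg hK, if_neg hK]
        have hlen : (heap.erase v).length = (o1 ++ m1).length := hperm1.length_eq
        by_cases hemp1 : o1 = [] ∧ m1 = []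
        · obtain ⟨rfl, rfl⟩ := hemp1
          have : (heap.erase v).length = 0 := by simpa using hlen
          rw [if_pos (by omega), if_pos (by simp)]
        · have hne1 : heap.erase v ≠ [] := by
            intro h
            rw [h] at hperm1
            rcases List.append_eq_nil_iff.mp hperm1.symm.eq_nil with ⟨h1, h2⟩
            exact hemp1 ⟨h1, h2⟩
          have hlen1 : ¬ (heap.erase v).length ≤ 0 := by
            cases h : heap.erase v with
            | nil => exact absurd h hne1
            | cons x xs => simp
          rw [if_neg hlen1]
          have hempb : ¬ (o1.isEmpty && m1.isEmpty) = true := by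
            simp only [Bool.and_eq_true, List.isEmpty_iff]
            intro h; exact hemp1 ⟨h.1, h.2⟩
          rw [if_neg hempb]
          obtain ⟨v2, o2, m2, hpopB2, hvmin2, hvmem2, herase2, so2, sm2, hshape2⟩ :=
            popMinB_spec so1 sm1 hemp1
          obtain ⟨w2, hpopA2, hwmem2, hwmin2⟩ := heapPop_of_ne_nil hne1
          have hwv2 : w2 = v2 := by
            have h1 : w2 ≤ v2 := hwmin2 v2 (hperm1.symm.subset hvmem2)
            have h2 : v2 ≤ w2 := hvmin2 w2 (hperm1.subset hwmem2)
            omega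
          rw [hwv2] at hpopA2
          simp only [hpopA2, hpopB2]
          by_cases hz : v + 2 * v2 = 0
          · rw [if_pos hz, if_pos hz]
          · rw [if_neg hz, if_neg hz]
            have hperm2 : ((heap.erase v).erase v2).Perm (o2 ++ m2) := by
              rw [herase2]; exact hperm1.erase v2
            apply ih
            · have hp := hperm2.append_right [v + 2 * v2]
              rw [List.append_assoc] at hp
              exact hp
            · exact inv_step ⟨so, sm, certs⟩ hvmin hvmin2 hvmem2 hshape hshape2 so2 sm2

-- ===== VERDICT (by name: the statement is the Claim_ definition above) =====
theorem solution_spec : Claim_equal_solution := by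
  intro scoville K _ _
  unfold Spec_solution solution solution_alt
  have hlen : (PySem.List.sorted scoville (fun x => x) false).length = scoville.length :=
    (PySem.List.sorted_perm ..).length_eq
  simp only [hlen]
  apply loop_eq
  · simpa using (PySem.List.sorted_perm scoville (fun x => x) false).symm
  · exact ⟨PySem.List.sorted_pairwise .., List.Pairwise.nil, fun i h => absurd h (by simp)⟩
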